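-- pv_equiv track=rewrite | github.com/alisoltanirad/Information-Extractor | information_extractor.py | __get_tags_since_dt
-- ===== SOURCE A (Python) =====
-- def __get_tags_since_dt(sentence, i):
--     tags = set()
--     for word, pos in sentence[:i]:
--         if pos == 'DT':
--             tags = set()
--         else:
--             tags.add(pos)
--     return '+'.join(sorted(tags))
-- ===== SOURCE B (Python) =====
-- def __get_tags_since_dt(sentence, i):
--     tags = set()
--     for word, pos in reversed(sentence[:i]):
--         if pos == 'DT':
--             break
--         tags.add(pos)
--     return '+'.join(sorted(tags))
-- ===== Notes on version B (the rewrite author's own statement) =====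
-- stated objective: alternative
-- what changed: B scans the prefix backwards and stops at the first 'DT' it meets (the last DT in forward order), instead of A's forward pass that resets the set at every 'DT'.
import Mathlib
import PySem

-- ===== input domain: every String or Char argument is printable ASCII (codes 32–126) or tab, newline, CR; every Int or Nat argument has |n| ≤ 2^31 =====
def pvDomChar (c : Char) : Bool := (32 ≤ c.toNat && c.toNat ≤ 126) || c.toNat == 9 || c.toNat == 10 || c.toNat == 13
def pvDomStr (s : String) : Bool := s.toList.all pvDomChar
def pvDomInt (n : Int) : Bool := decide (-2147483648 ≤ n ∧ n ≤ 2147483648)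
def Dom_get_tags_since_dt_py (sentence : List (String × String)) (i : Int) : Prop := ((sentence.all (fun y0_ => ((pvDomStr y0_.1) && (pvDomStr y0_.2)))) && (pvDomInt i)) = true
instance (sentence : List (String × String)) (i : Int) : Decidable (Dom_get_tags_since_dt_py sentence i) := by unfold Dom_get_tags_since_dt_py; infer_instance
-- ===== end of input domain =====

-- B scans the prefix backwards and stops at the first 'DT' it meets, instead of A's
-- forward pass resetting the set at each 'DT'; same cost, different decomposition.

-- ===== PORT A =====
-- forward pass: reset the set at each 'DT', add every other tag
def get_tags_since_dt_py (sentence : List (String × String)) (i : Int) : String :=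
  PySem.Str.join "+" (PySem.List.sorted
    ((PySem.List.slice sentence none (some i)).foldl
      (fun tags wp => if wp.2 == "DT" then PySem.Set.empty else PySem.Set.add tags wp.2)
      PySem.Set.empty)
    (fun x => x) false)

-- ===== PORT B =====
-- backward pass: collect tags until the first 'DT' (the last one in forward order)
def pvCollectRev (l : List (String × String)) (tags : PySem.Set String) : PySem.Set String :=
  match l with
  | [] => tags
  | wp :: rest => if wp.2 == "DT" then tags else pvCollectRev rest (PySem.Set.add tags wp.2)

def get_tags_since_dt_py_alt (sentence : List (String × String)) (i : Int) : String :=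
  PySem.Str.join "+" (PySem.List.sorted
    (pvCollectRev (PySem.List.slice sentence none (some i)).reverse PySem.Set.empty)
    (fun x => x) false)

-- ===== PRECONDITION & SPEC =====
def Spec_get_tags_since_dt_py (sentence : List (String × String)) (i : Int) (out : String) : Prop := out = get_tags_since_dt_py_alt sentence i
instance (sentence : List (String × String)) (i : Int) (out : String) : Decidable (Spec_get_tags_since_dt_py sentence i out) := by unfold Spec_get_tags_since_dt_py; infer_instance

-- ===== CLAIM (what is proved, stated in full; the proofs are below) =====
def Claim_equal_get_tags_since_dt_py : Prop := ∀ (sentence : List (String × String)) (i : Int), Dom_get_tags_since_dt_py sentence i → Spec_get_tags_since_dt_py sentence i (get_tags_since_dt_py sentence i)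

-- ===== LEMMAS AND PROOFS =====

theorem mem_pvCollectRev (l : List (String × String)) (acc : PySem.Set String) (x : String) :
    x ∈ pvCollectRev l acc ↔ x ∈ acc ∨ x ∈ pvCollectRev l [] := by
  induction l generalizing acc with
  | nil => simp [pvCollectRev]
  | cons wp rest ih =>
    by_cases h : (wp.2 == "DT") = true
    · simp [pvCollectRev, h]
    · simp only [pvCollectRev, if_neg h]
      rw [ih, ih (PySem.Set.add [] wp.2)]
      simp [PySem.Set.mem_add]
      tauto

theorem nodup_pvCollectRev (l : List (String × String)) (acc : PySem.Set String)
    (h : acc.Nodup) : (pvCollectRev l acc).Nodup := by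
  induction l generalizing acc with
  | nil => simpa [pvCollectRev]
  | cons wp rest ih =>
    by_cases hd : (wp.2 == "DT") = true
    · simpa [pvCollectRev, hd]
    · simp only [pvCollectRev, if_neg hd]
      exact ih _ (PySem.Set.nodup_add _ _ h)

theorem nodup_foldA (l : List (String × String)) (acc : PySem.Set String) (h : acc.Nodup) :
    (l.foldl (fun tags wp => if wp.2 == "DT" then PySem.Set.empty else PySem.Set.add tags wp.2) acc).Nodup := by
  induction l generalizing acc with
  | nil => simpa
  | cons wp rest ih =>
    simp only [List.foldl_cons]
    by_cases hd : (wp.2 == "DT") = true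
    · rw [if_pos hd]
      exact ih _ (by simp [PySem.Set.empty])
    · rw [if_neg hd]
      exact ih _ (PySem.Set.nodup_add _ _ h)

theorem mem_foldA_iff (l : List (String × String)) (x : String) :
    x ∈ l.foldl (fun tags wp => if wp.2 == "DT" then PySem.Set.empty else PySem.Set.add tags wp.2) PySem.Set.empty
      ↔ x ∈ pvCollectRev l.reverse [] := by
  induction l using List.reverseRecOn with
  | nil => simp [pvCollectRev, PySem.Set.empty]
  | append_singleton ys p ih =>
    simp only [List.foldl_append, List.foldl_cons, List.foldl_nil, List.reverse_append,
      List.reverse_cons, List.reverse_nil, List.nil_append, List.singleton_append]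
    by_cases hd : (p.2 == "DT") = true
    · simp [pvCollectRev, hd, PySem.Set.empty]
    · rw [if_neg hd]
      simp only [pvCollectRev, if_neg hd]
      rw [PySem.Set.mem_add, mem_pvCollectRev, ih, PySem.Set.mem_add]
      simp only [List.not_mem_nil, false_or]
      tauto

-- ===== VERDICT (by name: the statement is the Claim_ definition above) =====
theorem get_tags_since_dt_py_spec : Claim_equal_get_tags_since_dt_py := by
  intro sentence i _
  unfold Spec_get_tags_since_dt_py get_tags_since_dt_py get_tags_since_dt_py_alt
  congr 1
  apply PySem.List.sorted_eq_sorted_of_perm _ _ _ (fun _ _ h => h)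
  rw [List.perm_ext_iff_of_nodup (nodup_foldA _ _ (by simp [PySem.Set.empty]))
    (nodup_pvCollectRev _ _ (by simp [PySem.Set.empty]))]
  exact fun x => mem_foldA_iff _ x
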